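-- pv_equiv track=rewrite | github.com/LiteObject/ai-stock-analyst | src/backtesting/metrics.py | _max_consecutive_list
-- ===== SOURCE A (Python) =====
-- from typing import Any, Dict, List, Optional, Tuple
--
-- def _max_consecutive_list(lst: List[int], value: int) -> int:
--     """Find maximum consecutive occurrences in a list."""
--     if not lst:
--         return 0
--
--     max_count = 0
--     current_count = 0
--
--     for item in lst:
--         if item == value:
--             current_count += 1
--             max_count = max(max_count, current_count)
--         else:
--             current_count = 0
--
--     return max_count
-- ===== SOURCE B (Python) =====
-- def _max_consecutive_list(lst, value):
--     """Find maximum consecutive occurrences in a list (run-scanning two-pointer)."""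
--     best = 0
--     i = 0
--     n = len(lst)
--     while i < n:
--         j = i + 1
--         while j < n and lst[j] == lst[i]:
--             j += 1
--         if lst[i] == value and j - i > best:
--             best = j - i
--         i = j
--     return best
-- ===== Notes on version B (the rewrite author's own statement) =====
-- stated objective: alternative
-- what changed: Replaces the per-element running-counter state machine (current_count/max_count updated at every element) by a two-pointer run scanner: the outer loop jumps from run boundary to run boundary, measures each maximal run of equal elements at once, and keeps the best length among runs of the target value.
import Mathlib
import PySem

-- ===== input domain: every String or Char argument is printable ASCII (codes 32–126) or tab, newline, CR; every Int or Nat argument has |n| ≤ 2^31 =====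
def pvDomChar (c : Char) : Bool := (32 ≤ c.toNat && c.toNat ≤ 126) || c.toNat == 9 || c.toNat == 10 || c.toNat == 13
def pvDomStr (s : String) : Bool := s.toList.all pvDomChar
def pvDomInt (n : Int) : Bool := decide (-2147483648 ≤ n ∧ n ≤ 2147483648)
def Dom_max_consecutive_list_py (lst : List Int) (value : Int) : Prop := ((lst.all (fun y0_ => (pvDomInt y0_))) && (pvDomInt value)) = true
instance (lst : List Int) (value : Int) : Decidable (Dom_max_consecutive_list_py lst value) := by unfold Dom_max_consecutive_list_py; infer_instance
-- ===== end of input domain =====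

-- B replaces A's per-element running-counter state machine by a two-pointer run scanner
-- (jump run-by-run, keep the best length of runs equal to `value`); alternative, same cost.

-- ===== PORT A =====
-- loop body of A's for-loop: state = (max_count, current_count)
def stepA (value : Int) (s : Int × Int) (item : Int) : Int × Int :=
  if item == value then (max s.1 (s.2 + 1), s.2 + 1) else (s.1, 0)

def max_consecutive_list_py (lst : List Int) (value : Int) : Int :=
  if lst = [] then 0
  else (lst.foldl (stepA value) ((0 : Int), (0 : Int))).1

-- ===== PORT B =====
-- outer while-loop of B: the suffix lst[i:] is the list argument, `best` the accumulator;
-- the inner while (scanning to the end of the current run) is the takeWhile/dropWhile split.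
def scanB (value : Int) : List Int → Int → Int
  | [], best => best
  | x :: xs, best =>
    let len : Int := 1 + (xs.takeWhile (· == x)).length
    scanB value (xs.dropWhile (· == x)) (if x = value ∧ len > best then len else best)
termination_by l _ => l.length
decreasing_by
  simpa using Nat.lt_succ_of_le (List.length_dropWhile_le (· == x) xs)

def max_consecutive_list_py_alt (lst : List Int) (value : Int) : Int :=
  scanB value lst 0

-- ===== PRECONDITION & SPEC =====
def Spec_max_consecutive_list_py (lst : List Int) (value : Int) (out : Int) : Prop := out = max_consecutive_list_py_alt lst value
instance (lst : List Int) (value : Int) (out : Int) : Decidable (Spec_max_consecutive_list_py lst value out) := by unfold Spec_max_consecutive_list_py; infer_instance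

-- ===== CLAIM (what is proved, stated in full; the proofs are below) =====
def Claim_equal_max_consecutive_list_py : Prop := ∀ (lst : List Int) (value : Int), Dom_max_consecutive_list_py lst value → Spec_max_consecutive_list_py lst value (max_consecutive_list_py lst value)

-- ===== LEMMAS AND PROOFS =====

-- A's loop over a block of elements all equal to `value`: the counter grows by the block
-- length and the maximum absorbs it (invariant: current_count ≤ max_count).
theorem foldl_value_block (value : Int) (t : List Int) (ht : ∀ a ∈ t, a = value) :
    ∀ m c : Int, c ≤ m →
      t.foldl (stepA value) (m, c) = (max m (c + (t.length : Int)), c + (t.length : Int)) := by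
  induction t with
  | nil => intro m c hcm; simp [max_eq_left hcm]
  | cons a t' ih =>
    intro m c hcm
    have ha : a = value := ht a (by simp)
    have hrest : ∀ b ∈ t', b = value := fun b hb => ht b (by simp [hb])
    simp only [List.foldl_cons, stepA, ha, BEq.rfl, if_true]
    rw [ih hrest (max m (c + 1)) (c + 1) (le_max_right _ _)]
    have hlen : (0 : Int) ≤ (t'.length : Int) := Int.natCast_nonneg _
    simp only [Prod.mk.injEq, List.length_cons]
    push_cast
    constructor <;> omega

-- A's loop over a block of elements all different from `value`, starting with counter 0:
-- the state is unchanged.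
theorem foldl_novalue_block (value : Int) (t : List Int) (ht : ∀ a ∈ t, a ≠ value) :
    ∀ m : Int, t.foldl (stepA value) (m, 0) = (m, 0) := by
  induction t with
  | nil => intro m; simp
  | cons a t' ih =>
    intro m
    have ha : a ≠ value := ht a (by simp)
    have hrest : ∀ b ∈ t', b ≠ value := fun b hb => ht b (by simp [hb])
    simp only [List.foldl_cons, stepA, beq_iff_eq, if_neg ha]
    exact ih hrest m

-- head of a dropWhile result fails the predicate
theorem dropWhile_head_not {l r : List Int} {p : Int → Bool} {y : Int}
    (h : l.dropWhile p = y :: r) : p y = false := by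
  have := List.head?_dropWhile_not p l
  simp [h] at this; simpa using this

-- Main loop correspondence: A's fold from (m, 0) computes exactly B's run scan with
-- accumulator m (strong induction on the length of the suffix).
theorem loop_eq (value : Int) :
    ∀ (n : Nat) (lst : List Int), lst.length ≤ n → ∀ m : Int, 0 ≤ m →
      (lst.foldl (stepA value) (m, 0)).1 = scanB value lst m := by
  intro n
  induction n with
  | zero =>
    intro lst h m _
    have : lst = [] := List.length_eq_zero_iff.mp (Nat.le_zero.mp h)
    subst this; simp [scanB]
  | succ n ih =>
    intro lst h m hm
    cases lst with
    | nil => simp [scanB]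
    | cons x xs =>
      have hsplit : xs.takeWhile (· == x) ++ xs.dropWhile (· == x) = xs :=
        List.takeWhile_append_dropWhile
      have hrlen : (xs.dropWhile (· == x)).length ≤ n := by
        have h1 := List.length_dropWhile_le (· == x) xs
        simp at h; omega
      have htw : ∀ a ∈ xs.takeWhile (· == x), a = x := by
        intro a haa
        have := List.mem_takeWhile_imp haa
        simpa using this
      set t := xs.takeWhile (· == x) with htdef
      set r := xs.dropWhile (· == x) with hrdef
      rw [scanB]
      by_cases hx : x = value
      · -- x = value: the leading run x :: t counts
        have htv : ∀ a ∈ t, a = value := fun a haa => (htw a haa).trans hx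
        have hstep : stepA value (m, 0) x = (max m 1, 1) := by
          simp [stepA, hx]
        calc ((x :: xs).foldl (stepA value) (m, 0)).1
            = ((t ++ r).foldl (stepA value) (max m 1, 1)).1 := by
              rw [List.foldl_cons, hstep, ← hsplit]
          _ = (r.foldl (stepA value) (max (max m 1) (1 + (t.length : Int)), 1 + (t.length : Int))).1 := by
              rw [List.foldl_append, foldl_value_block value t htv (max m 1) 1 (le_max_right _ _)]
          _ = (r.foldl (stepA value) (max m (1 + (t.length : Int)), 1 + (t.length : Int))).1 := by
              have : max (max m 1) (1 + (t.length : Int)) = max m (1 + (t.length : Int)) := by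
                have : (0 : Int) ≤ (t.length : Int) := Int.natCast_nonneg _
                omega
              rw [this]
          _ = scanB value r (if x = value ∧ 1 + (t.length : Int) > m then 1 + (t.length : Int) else m) := by
              have hM : (0 : Int) ≤ max m (1 + (t.length : Int)) := le_trans hm (le_max_left _ _)
              have hmax : (if x = value ∧ 1 + (t.length : Int) > m then 1 + (t.length : Int) else m)
                  = max m (1 + (t.length : Int)) := by
                simp only [hx, true_and]; split <;> omega
              rw [hmax]
              cases hr : r with
              | nil => simp [scanB]
              | cons y r' =>
                have hy : ¬ (y = x) := by
                  have := dropWhile_head_not (hrdef ▸ hr)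
                  simpa using this
                have hyv : y ≠ value := fun hc => hy (hc.trans hx.symm)
                -- the first element of r resets the counter, so the carried counter is irrelevant
                have hreset : ∀ c : Int,
                    ((y :: r').foldl (stepA value) (max m (1 + (t.length : Int)), c)).1
                    = (r'.foldl (stepA value) (max m (1 + (t.length : Int)), 0)).1 := by
                  intro c; simp [List.foldl_cons, stepA, hyv]
                rw [hreset]
                have := ih (y :: r') (hr ▸ hrlen) (max m (1 + (t.length : Int))) hM
                rw [← this, List.foldl_cons]
                simp [stepA, hyv]
      · -- x ≠ value: the leading run contributes nothing on either side
        have htv : ∀ a ∈ t, a ≠ value := fun a haa => (htw a haa) ▸ hx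
        have hstep : stepA value (m, 0) x = (m, 0) := by simp [stepA, hx]
        have hcond : (if x = value ∧ 1 + (t.length : Int) > m then 1 + (t.length : Int) else m) = m := by
          simp [hx]
        rw [hcond]
        calc ((x :: xs).foldl (stepA value) (m, 0)).1
            = ((t ++ r).foldl (stepA value) (m, 0)).1 := by rw [List.foldl_cons, hstep, ← hsplit]
          _ = (r.foldl (stepA value) (m, 0)).1 := by
              rw [List.foldl_append, foldl_novalue_block value t htv m]
          _ = scanB value r m := ih r hrlen m hm

-- ===== VERDICT (by name: the statement is the Claim_ definition above) =====
theorem max_consecutive_list_py_spec : Claim_equal_max_consecutive_list_py := by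
  intro lst value _
  unfold Spec_max_consecutive_list_py max_consecutive_list_py max_consecutive_list_py_alt
  cases lst with
  | nil => simp [scanB]
  | cons x xs =>
    rw [if_neg (by simp : ¬(x :: xs = []))]
    exact loop_eq value (x :: xs).length (x :: xs) le_rfl 0 le_rfl
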